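-- pv_equiv track=rewrite | github.com/danielramraz/AI_Lab4 | SortingNetworkHandler.py | generate_bitonic_network
-- ===== SOURCE A (Python) =====
-- def generate_bitonic_network(sorting_list_size: int) -> list:
--     if sorting_list_size == 1:
--         return []
--
--     # Generate comparisons for the first half of the network
--     comparisons = generate_bitonic_network(sorting_list_size//2)
--     # Mirror the comparisons for the second half of the network
--     comparisons += [(i + sorting_list_size // 2, j + sorting_list_size // 2) for i, j in comparisons[::-1]]
--
--     # Add additional comparisons to create a bitonic sequence
--     for i in range(sorting_list_size // 2):
--         comparisons.append((i, i + sorting_list_size // 2))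
--
--     return comparisons
-- ===== SOURCE B (Python) =====
-- def generate_bitonic_network(sorting_list_size: int) -> list:
--     # Bottom-up: collect the chain of sizes (n, n//2, ..., 2), then build
--     # the comparison list iteratively from the smallest size upward.
--     sizes = []
--     s = sorting_list_size
--     while s > 1:
--         sizes.append(s)
--         s //= 2
--     comps = []
--     for s in reversed(sizes):
--         half = s // 2
--         comps = comps \
--             + [(i + half, j + half) for i, j in reversed(comps)] \
--             + [(i, i + half) for i in range(half)]
--     return comps
-- ===== Notes on version B (the rewrite author's own statement) =====
-- stated objective: alternative
-- what changed: Replaces the top-down recursion with an explicit bottom-up loop: first collect the chain of sizes by repeated halving, then iteratively extend the comparison list (mirror of the reverse plus a new layer) for each size in increasing order.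
import Mathlib
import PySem

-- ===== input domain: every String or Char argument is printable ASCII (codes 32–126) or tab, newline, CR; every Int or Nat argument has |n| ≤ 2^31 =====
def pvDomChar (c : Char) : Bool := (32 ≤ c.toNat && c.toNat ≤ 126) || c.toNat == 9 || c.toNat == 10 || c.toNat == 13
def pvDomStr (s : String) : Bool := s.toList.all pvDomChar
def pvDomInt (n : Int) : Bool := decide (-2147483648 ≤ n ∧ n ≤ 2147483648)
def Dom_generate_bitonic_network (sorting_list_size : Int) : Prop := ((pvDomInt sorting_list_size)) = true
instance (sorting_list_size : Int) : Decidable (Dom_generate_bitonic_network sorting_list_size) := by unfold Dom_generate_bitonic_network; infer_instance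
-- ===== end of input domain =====

-- B replaces A's top-down recursion by a bottom-up loop over the halving chain of sizes (alternative decomposition, same cost).
-- Equivalence is about the return value only (A mutates no argument).

-- ===== PORT A =====
-- Python A recurses on n//2; it terminates only for n ≥ 1 (Pre_).  The `n ≤ 1`
-- guard merges Python's `n == 1` base case with the totality guard for n ≤ 0
-- (outside Pre_, where Python A raises RecursionError).
def generate_bitonic_network (sorting_list_size : Int) : List (Int × Int) :=
  if sorting_list_size ≤ 1 then []
  else
    let half := PySem.Int.floordiv sorting_list_size 2
    let comparisons := generate_bitonic_network half
    let comparisons := comparisons ++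
      (comparisons.reverse.map (fun p => (p.1 + half, p.2 + half)))
    comparisons ++ (PySem.List.pyRange 0 half 1).map (fun i => (i, i + half))
termination_by sorting_list_size.toNat
decreasing_by
  rw [PySem.Int.floordiv_eq_ediv_of_pos (by omega : (0:Int) < 2)]
  omega

-- ===== PORT B =====
-- the `while s > 1: sizes.append(s); s //= 2` loop of Source B
def pvChainSizes (s : Int) : List Int :=
  if 1 < s then s :: pvChainSizes (PySem.Int.floordiv s 2) else []
termination_by s.toNat
decreasing_by
  rw [PySem.Int.floordiv_eq_ediv_of_pos (by omega : (0:Int) < 2)]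
  omega

-- one iteration of Source B's `for s in reversed(sizes)` loop body
def pvStep (comps : List (Int × Int)) (s : Int) : List (Int × Int) :=
  let half := PySem.Int.floordiv s 2
  comps ++ (comps.reverse.map (fun p => (p.1 + half, p.2 + half)))
        ++ (PySem.List.pyRange 0 half 1).map (fun i => (i, i + half))

def generate_bitonic_network_alt (sorting_list_size : Int) : List (Int × Int) :=
  ((pvChainSizes sorting_list_size).reverse).foldl pvStep []

-- ===== PRECONDITION & SPEC =====
-- Pre_: Python A terminates exactly for sorting_list_size ≥ 1 (for n ≤ 0 the
-- recursion n ↦ n//2 never reaches 1 and A raises RecursionError).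
def Pre_generate_bitonic_network (sorting_list_size : Int) : Prop := 1 ≤ sorting_list_size
instance (sorting_list_size : Int) : Decidable (Pre_generate_bitonic_network sorting_list_size) := by unfold Pre_generate_bitonic_network; infer_instance
def pvWitness_generate_bitonic_network : Int := 4

def Spec_generate_bitonic_network (sorting_list_size : Int) (out : List (Int × Int)) : Prop := out = generate_bitonic_network_alt sorting_list_size
instance (sorting_list_size : Int) (out : List (Int × Int)) : Decidable (Spec_generate_bitonic_network sorting_list_size out) := by unfold Spec_generate_bitonic_network; infer_instance

-- ===== CLAIM (what is proved, stated in full; the proofs are below) =====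
def Claim_equal_generate_bitonic_network : Prop := ∀ (sorting_list_size : Int), Dom_generate_bitonic_network sorting_list_size → Pre_generate_bitonic_network sorting_list_size → Spec_generate_bitonic_network sorting_list_size (generate_bitonic_network sorting_list_size)

-- ===== LEMMAS AND PROOFS =====

theorem pv_key (k : Nat) : ∀ (n : Int), n.toNat ≤ k → 1 ≤ n →
    generate_bitonic_network n = generate_bitonic_network_alt n := by
  induction k with
  | zero => intro n hk h1; omega
  | succ k ih =>
    intro n hk h1
    by_cases hle : n ≤ 1
    · have hn1 : n = 1 := by omega
      subst hn1
      rw [generate_bitonic_network]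
      rw [generate_bitonic_network_alt, pvChainSizes]
      simp
    · have h2 : 2 ≤ n := by omega
      have hfd : PySem.Int.floordiv n 2 = n / 2 :=
        PySem.Int.floordiv_eq_ediv_of_pos (by omega)
      have hih : generate_bitonic_network (PySem.Int.floordiv n 2) =
          generate_bitonic_network_alt (PySem.Int.floordiv n 2) := by
        apply ih
        · rw [hfd]; omega
        · rw [hfd]; omega
      rw [generate_bitonic_network]
      rw [if_neg hle]
      rw [generate_bitonic_network_alt, pvChainSizes, if_pos (by omega : 1 < n)]
      simp only [List.reverse_cons, List.foldl_append, List.foldl_cons, List.foldl_nil]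
      rw [hih]
      rw [generate_bitonic_network_alt]
      simp [pvStep]

-- ===== VERDICT (by name: the statement is the Claim_ definition above) =====
theorem generate_bitonic_network_spec : Claim_equal_generate_bitonic_network := by
  intro n _ hpre
  unfold Spec_generate_bitonic_network
  exact pv_key n.toNat n le_rfl hpre
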